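-- pv_equiv track=rewrite | github.com/yama2908/Codility | perm_check.py | solution
-- ===== SOURCE A (Python) =====
-- def solution(A):
--     # write your code in Python 3.6
--     orx = 0
--     for i in range(len(A)):
--         orx ^= A[i] ^ (i + 1)
--
--     if orx == 0:
--         return 1
--     else:
--         return 0
-- ===== SOURCE B (Python) =====
-- def solution(A):
--     # XOR all elements in one pass; get XOR of 1..n from the closed form keyed on n % 4.
--     xor_a = 0
--     for x in A:
--         xor_a ^= x
--     n = len(A)
--     r = n % 4
--     if r == 0:
--         xor_idx = n
--     elif r == 1:
--         xor_idx = 1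
--     elif r == 2:
--         xor_idx = n + 1
--     else:
--         xor_idx = 0
--     return 1 if xor_a == xor_idx else 0
-- ===== Notes on version B (the rewrite author's own statement) =====
-- stated objective: faster
-- what changed: B XORs only the elements in a single loop and obtains the XOR of the indices 1..n from the n%4 closed form instead of interleaving per-index XORs, then compares the two halves.
import Mathlib
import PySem

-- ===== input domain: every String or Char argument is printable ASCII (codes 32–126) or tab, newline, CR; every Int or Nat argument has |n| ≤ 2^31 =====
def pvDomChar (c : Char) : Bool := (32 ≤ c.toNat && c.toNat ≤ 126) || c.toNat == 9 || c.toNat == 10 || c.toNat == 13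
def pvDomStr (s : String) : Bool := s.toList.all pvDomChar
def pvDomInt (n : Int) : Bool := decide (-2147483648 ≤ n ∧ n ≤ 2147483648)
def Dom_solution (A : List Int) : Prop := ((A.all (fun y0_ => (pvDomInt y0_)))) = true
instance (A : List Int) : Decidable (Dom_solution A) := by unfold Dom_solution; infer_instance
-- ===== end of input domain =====

-- B replaces A's interleaved per-index XOR loop by a single element-XOR pass plus the n%4
-- closed form for XOR(1..n); same value on every input, measurably faster by a constant factor (half the XORs, no index arithmetic).

-- ===== PORT A =====
def solution (A : List Int) : Int :=
  let orx := (PySem.List.pyRange 0 (A.length : Int) 1).foldl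
      (fun orx i => PySem.Int.bxor orx (PySem.Int.bxor (PySem.List.pyGetD A i 0) (i + 1))) 0
  -- pyGetD default is never used: i ranges over 0..len-1
  if orx = 0 then 1 else 0

-- ===== PORT B =====
def solution_alt (A : List Int) : Int :=
  let xorA := A.foldl (fun acc x => PySem.Int.bxor acc x) 0
  let n : Int := (A.length : Int)
  let r := PySem.Int.mod n 4
  let xorIdx : Int := if r = 0 then n else if r = 1 then 1 else if r = 2 then n + 1 else 0
  if xorA = xorIdx then 1 else 0

-- ===== PRECONDITION & SPEC =====
def Spec_solution (A : List Int) (out : Int) : Prop := out = solution_alt A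
instance (A : List Int) (out : Int) : Decidable (Spec_solution A out) := by unfold Spec_solution; infer_instance

-- ===== CLAIM (what is proved, stated in full; the proofs are below) =====
def Claim_equal_solution : Prop := ∀ (A : List Int), Dom_solution A → Spec_solution A (solution A)

-- ===== LEMMAS AND PROOFS =====

lemma bxor_eq_xor (a b : Int) : PySem.Int.bxor a b = Int.xor a b := by
  rcases a with m | m <;> rcases b with n | n <;>
    simp [PySem.Int.bxor, Int.xor, Int.negSucc_eq] <;> omega

lemma int_xor_assoc (a b c : Int) :
    Int.xor (Int.xor a b) c = Int.xor a (Int.xor b c) := by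
  rcases a with m | m <;> rcases b with n | n <;> rcases c with k | k <;>
    simp [Int.xor, Nat.xor_assoc]

lemma bxor_assoc (a b c : Int) :
    PySem.Int.bxor (PySem.Int.bxor a b) c = PySem.Int.bxor a (PySem.Int.bxor b c) := by
  simp [bxor_eq_xor, int_xor_assoc]

lemma bxor_left_comm (a b c : Int) :
    PySem.Int.bxor a (PySem.Int.bxor b c) = PySem.Int.bxor b (PySem.Int.bxor a c) := by
  rw [← bxor_assoc, PySem.Int.bxor_comm a b, bxor_assoc]

lemma bxor_eq_zero_iff (a b : Int) : PySem.Int.bxor a b = 0 ↔ a = b := by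
  constructor
  · intro h
    have h2 : PySem.Int.bxor (PySem.Int.bxor a b) b = PySem.Int.bxor 0 b := by rw [h]
    rw [bxor_assoc, PySem.Int.bxor_self, PySem.Int.bxor_zero, PySem.Int.bxor_comm,
      PySem.Int.bxor_zero] at h2
    exact h2
  · intro h; rw [h, PySem.Int.bxor_self]

lemma nat_two_mul_xor_one (k : Nat) : 2 * k ^^^ 1 = 2 * k + 1 := by
  apply Nat.eq_of_testBit_eq
  intro i
  cases i with
  | zero =>
    simp [Nat.testBit_zero]
  | succ j =>
    have h1 : 2 * k / 2 = k := by omega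
    have h2 : (2 * k + 1) / 2 = k := by omega
    simp [Nat.testBit_succ, h2]

lemma even_xor_one (m : Nat) (h : m % 2 = 0) : m ^^^ 1 = m + 1 := by
  obtain ⟨k, rfl⟩ : ∃ k, m = 2 * k := ⟨m / 2, by omega⟩
  exact nat_two_mul_xor_one k

lemma even_xor_succ (m : Nat) (h : m % 2 = 0) : m ^^^ (m + 1) = 1 := by
  rw [← even_xor_one m h, ← Nat.xor_assoc, Nat.xor_self, Nat.zero_xor]

-- XOR of 1..n as the n%4 closed form (the quantity B computes)
def gNat (n : Nat) : Nat :=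
  match n % 4 with
  | 0 => n
  | 1 => 1
  | 2 => n + 1
  | _ => 0

lemma gNat_succ (n : Nat) : gNat (n + 1) = gNat n ^^^ (n + 1) := by
  have h4 : n % 4 = 0 ∨ n % 4 = 1 ∨ n % 4 = 2 ∨ n % 4 = 3 := by omega
  rcases h4 with h | h | h | h
  · have h' : (n + 1) % 4 = 1 := by omega
    simp [gNat, h, h']
    exact (even_xor_succ n (by omega)).symm
  · have h' : (n + 1) % 4 = 2 := by omega
    simp [gNat, h, h']
    rw [Nat.xor_comm, even_xor_one (n + 1) (by omega)]
  · have h' : (n + 1) % 4 = 3 := by omega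
    simp [gNat, h, h']
  · have h' : (n + 1) % 4 = 0 := by omega
    simp [gNat, h, h']

lemma loop_eq_aux (A : List Int) :
    (List.range A.length).foldl
        (fun o k => PySem.Int.bxor o
          (PySem.Int.bxor (PySem.List.pyGetD A ((k : Nat) : Int) 0) ((k : Nat) + 1))) 0
      = PySem.Int.bxor (A.foldl (fun acc x => PySem.Int.bxor acc x) 0) ((gNat A.length : Nat) : Int) := by
  induction A using List.reverseRecOn with
  | nil => decide
  | append_singleton B x ih =>
    have hL : (B ++ [x]).length = B.length + 1 := by simp
    rw [hL, List.range_succ, List.foldl_append]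
    have hcong :
        (List.range B.length).foldl
            (fun o k => PySem.Int.bxor o
              (PySem.Int.bxor (PySem.List.pyGetD (B ++ [x]) ((k : Nat) : Int) 0) ((k : Nat) + 1))) 0
          = (List.range B.length).foldl
            (fun o k => PySem.Int.bxor o
              (PySem.Int.bxor (PySem.List.pyGetD B ((k : Nat) : Int) 0) ((k : Nat) + 1))) 0 := by
      apply PySem.List.foldl_congr_mem
      intro acc k hk
      have hk' : k < B.length := List.mem_range.mp hk
      rw [PySem.List.pyGetD_eq_getElem _ _ (Int.natCast_nonneg k) (by simp; omega),
        PySem.List.pyGetD_eq_getElem _ _ (Int.natCast_nonneg k) (by exact_mod_cast hk')]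
      simp only [Int.toNat_natCast]
      rw [List.getElem_append_left hk']
    rw [hcong, ih]
    simp only [List.foldl_cons, List.foldl_nil]
    rw [PySem.List.pyGetD_eq_getElem _ _ (Int.natCast_nonneg B.length) (by simp)]
    simp only [Int.toNat_natCast]
    rw [List.getElem_concat_length rfl]
    rw [List.foldl_append]
    simp only [List.foldl_cons, List.foldl_nil]
    rw [gNat_succ, ← PySem.Int.bxor_natCast]
    push_cast
    simp only [bxor_left_comm, PySem.Int.bxor_comm]

lemma loop_eq (A : List Int) :
    (PySem.List.pyRange 0 (A.length : Int) 1).foldl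
        (fun orx i => PySem.Int.bxor orx (PySem.Int.bxor (PySem.List.pyGetD A i 0) (i + 1))) 0
      = PySem.Int.bxor (A.foldl (fun acc x => PySem.Int.bxor acc x) 0) ((gNat A.length : Nat) : Int) := by
  rw [PySem.List.pyRange_zero_natCast, List.foldl_map]
  exact loop_eq_aux A

-- ===== VERDICT (by name: the statement is the Claim_ definition above) =====
theorem solution_spec : Claim_equal_solution := by
  intro A _
  unfold Spec_solution solution solution_alt
  simp only [loop_eq]
  have hm : PySem.Int.mod (A.length : Int) 4 = ((A.length % 4 : Nat) : Int) := by
    exact_mod_cast PySem.Int.mod_natCast A.length 4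
  rw [hm]
  have h4 : A.length % 4 = 0 ∨ A.length % 4 = 1 ∨ A.length % 4 = 2 ∨ A.length % 4 = 3 := by omega
  rcases h4 with h | h | h | h <;>
    (simp only [h]; norm_num [gNat, h, bxor_eq_zero_iff])
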